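-- pv_equiv track=rewrite | github.com/kuznetsovvj/education | algorithms/codeforces/1669c.py | solution
-- ===== SOURCE A (Python) =====
-- def solution(seq):
--     a, b = set(), set()
--     for i in range(len(seq)):
--         if i % 2 == 0:
--             a.add(seq[i] % 2)
--         else:
--             b.add(seq[i] % 2)
--     if len(a) == 1 and len(b) == 1:
--         return "YES"
--     return "NO"
-- ===== SOURCE B (Python) =====
-- def solution(seq):
--     # An index-parity class is uniform iff every element has the same parity as
--     # the element two positions later; both classes are non-empty iff len >= 2.
--     if len(seq) < 2:
--         return "NO"
--     for x, y in zip(seq, seq[2:]):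
--         if (x - y) % 2:
--             return "NO"
--     return "YES"
-- ===== Notes on version B (the rewrite author's own statement) =====
-- stated objective: alternative
-- what changed: B never groups the elements at all: instead of A's two sets of distinct parities per index class, it does one scan of zip(seq, seq[2:]) checking that each element and the element two positions later differ by an even number (with a len>=2 guard), early-returning NO on the first mismatch.
import Mathlib
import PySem

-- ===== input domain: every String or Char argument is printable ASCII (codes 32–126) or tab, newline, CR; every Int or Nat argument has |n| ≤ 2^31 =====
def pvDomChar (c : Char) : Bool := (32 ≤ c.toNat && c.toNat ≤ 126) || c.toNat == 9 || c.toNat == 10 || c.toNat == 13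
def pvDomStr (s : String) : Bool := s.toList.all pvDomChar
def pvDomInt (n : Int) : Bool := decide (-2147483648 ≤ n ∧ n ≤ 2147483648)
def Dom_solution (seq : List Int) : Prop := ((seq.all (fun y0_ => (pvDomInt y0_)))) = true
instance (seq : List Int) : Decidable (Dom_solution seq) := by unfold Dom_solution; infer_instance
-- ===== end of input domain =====

-- B replaces A's per-index-class parity sets by a single scan of zip(seq, seq[2:])
-- checking that elements two positions apart differ by an even number; same O(n) cost.

-- ===== PORT A =====
-- for i in range(len(seq)): if i % 2 == 0: a.add(seq[i] % 2) else: b.add(seq[i] % 2)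
def solution (seq : List Int) : String :=
  let ab : PySem.Set Int × PySem.Set Int :=
    (PySem.List.pyRange 0 (seq.length : Int) 1).foldl
      (fun ab i =>
        if PySem.Int.mod i 2 = 0 then
          (PySem.Set.add ab.1 (PySem.Int.mod (PySem.List.pyGetD seq i 0) 2), ab.2)
        else
          (ab.1, PySem.Set.add ab.2 (PySem.Int.mod (PySem.List.pyGetD seq i 0) 2)))
      (PySem.Set.empty, PySem.Set.empty)
  if PySem.Set.len ab.1 = 1 ∧ PySem.Set.len ab.2 = 1 then "YES" else "NO"

-- ===== PORT B =====
-- the early-return for-loop over zip(seq, seq[2:]): "NO" at the first pair whose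
-- difference is odd, "YES" if it falls off the end
def chk : List (Int × Int) → String
  | [] => "YES"
  | (x, y) :: rest => if PySem.Int.mod (x - y) 2 ≠ 0 then "NO" else chk rest

def solution_alt (seq : List Int) : String :=
  if seq.length < 2 then "NO"
  else chk (seq.zip (seq.drop 2))

-- ===== PRECONDITION & SPEC =====
def Spec_solution (seq : List Int) (out : String) : Prop := out = solution_alt seq
instance (seq : List Int) (out : String) : Decidable (Spec_solution seq out) := by unfold Spec_solution; infer_instance

-- ===== CLAIM (what is proved, stated in full; the proofs are below) =====
def Claim_equal_solution : Prop := ∀ (seq : List Int), Dom_solution seq → Spec_solution seq (solution seq)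

-- ===== LEMMAS AND PROOFS =====

-- seq[a::2] for a ∈ {0,1}: every second element
def stride2 (xs : List Int) : List Int :=
  match xs with
  | [] => []
  | x :: rest => x :: stride2 (rest.drop 1)
  termination_by xs.length
  decreasing_by simp

-- "every element of l has x's parity"
def AllPar (x : Int) (l : List Int) : Prop :=
  ∀ e ∈ l, PySem.Int.mod e 2 = PySem.Int.mod x 2

-- A's loop body as a named function (over enumerated pairs).
def stepAB (ab : PySem.Set Int × PySem.Set Int) (p : Int × Int) : PySem.Set Int × PySem.Set Int :=
  if PySem.Int.mod p.1 2 = 0 then (PySem.Set.add ab.1 (PySem.Int.mod p.2 2), ab.2)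
  else (ab.1, PySem.Set.add ab.2 (PySem.Int.mod p.2 2))

lemma stride2_nil : stride2 [] = [] := by
  rw [stride2.eq_def]

lemma stride2_cons (x : Int) (xs : List Int) :
    stride2 (x :: xs) = x :: stride2 (xs.drop 1) := by
  rw [stride2.eq_def]

-- Characterisation of A's loop: folding stepAB over enumerate xs s fills a with the
-- parities at positions of s's parity and b with the others.
lemma foldA_char (xs : List Int) : ∀ (s : Int) (a b : PySem.Set Int),
    (PySem.List.enumerate xs s).foldl stepAB (a, b) =
      (if PySem.Int.mod s 2 = 0 then
        (PySem.Set.update a ((stride2 xs).map (fun e => PySem.Int.mod e 2)),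
         PySem.Set.update b ((stride2 (xs.drop 1)).map (fun e => PySem.Int.mod e 2)))
      else
        (PySem.Set.update a ((stride2 (xs.drop 1)).map (fun e => PySem.Int.mod e 2)),
         PySem.Set.update b ((stride2 xs).map (fun e => PySem.Int.mod e 2)))) := by
  induction xs with
  | nil => intro s a b; simp [PySem.List.enumerate, stride2_nil, PySem.Set.update]
  | cons x xs ih =>
    intro s a b
    rw [PySem.List.enumerate_cons]
    have hpar : PySem.Int.mod (s + 1) 2 = if PySem.Int.mod s 2 = 0 then 1 else 0 := by
      rw [PySem.Int.mod_eq_emod_of_pos (by norm_num), PySem.Int.mod_eq_emod_of_pos (by norm_num)]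
      rcases Int.emod_two_eq s with h | h <;> simp [h] <;> omega
    by_cases hs : PySem.Int.mod s 2 = 0
    · simp only [List.foldl_cons, stepAB, hs, if_true, ih (s + 1), hpar]
      simp [stride2_cons, PySem.Set.update]
    · simp only [List.foldl_cons, stepAB, hs, if_false, ih (s + 1), hpar]
      simp [stride2_cons, PySem.Set.update]

-- the start set is a prefix of the updated set
lemma prefix_update (ys : List Int) : ∀ (s : PySem.Set Int), s <+: PySem.Set.update s ys := by
  induction ys with
  | nil => intro s; simp [PySem.Set.update]
  | cons y ys ih =>
    intro s
    have h1 : s <+: PySem.Set.add s y := by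
      unfold PySem.Set.add
      split <;> simp
    exact h1.trans (by simpa [PySem.Set.update] using ih (PySem.Set.add s y))

lemma update_singleton_eq (x : Int) (ys : List Int) :
    PySem.Set.update [x] ys = [x] ↔ ∀ y ∈ ys, y = x := by
  induction ys generalizing x with
  | nil => simp [PySem.Set.update]
  | cons y ys ih =>
    by_cases h : y = x
    · subst h
      have hadd : PySem.Set.add [y] y = [y] := by simp [PySem.Set.add, PySem.Set.contains]
      rw [show PySem.Set.update [y] (y :: ys) = PySem.Set.update (PySem.Set.add [y] y) ys
            from rfl, hadd, ih]
      simp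
    · constructor
      · intro heq
        exfalso
        have hadd : PySem.Set.add [x] y = [x, y] := by
          simp [PySem.Set.add, PySem.Set.contains, h]
        have hpre : [x, y] <+: PySem.Set.update [x] (y :: ys) := by
          rw [show PySem.Set.update [x] (y :: ys) = PySem.Set.update (PySem.Set.add [x] y) ys
              from rfl, hadd]
          exact prefix_update ys [x, y]
        have := hpre.length_le
        rw [heq] at this; simp at this
      · intro hall; exact absurd (hall y (by simp)) h

-- len(set(l)) == 1 ↔ every element of l equals its head (l nonempty)
lemma len_ofList_one_iff (x : Int) (rest : List Int) :
    PySem.Set.len (PySem.Set.ofList (x :: rest)) = 1 ↔ ∀ y ∈ rest, y = x := by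
  have hof : PySem.Set.ofList (x :: rest) = PySem.Set.update [x] rest := by
    simp [PySem.Set.ofList, PySem.Set.update, List.foldl_cons, PySem.Set.add,
      PySem.Set.contains, PySem.Set.empty]
  rw [hof]
  constructor
  · intro hlen
    have hpre : [x] <+: PySem.Set.update [x] rest := prefix_update rest [x]
    have hlen' : (PySem.Set.update [x] rest).length = 1 := by
      simp only [PySem.Set.len] at hlen; exact_mod_cast hlen
    have heq : [x] = PySem.Set.update [x] rest :=
      hpre.eq_of_length (by simp [hlen'])
    exact (update_singleton_eq x rest).mp heq.symm
  · intro hall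
    rw [(update_singleton_eq x rest).mpr hall]
    simp [PySem.Set.len]

-- "distinct parities of (u::us) form a singleton" = AllPar u us
lemma len_one_iff_allPar (u : Int) (us : List Int) :
    PySem.Set.len (PySem.Set.ofList ((u :: us).map (fun e => PySem.Int.mod e 2))) = 1
      ↔ AllPar u us := by
  rw [List.map_cons, len_ofList_one_iff]
  simp [AllPar]

-- A's fold applied to seq from the start
lemma solution_fold (seq : List Int) :
    (PySem.List.pyRange 0 (seq.length : Int) 1).foldl
      (fun ab i =>
        if PySem.Int.mod i 2 = 0 then
          (PySem.Set.add ab.1 (PySem.Int.mod (PySem.List.pyGetD seq i 0) 2), ab.2)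
        else
          (ab.1, PySem.Set.add ab.2 (PySem.Int.mod (PySem.List.pyGetD seq i 0) 2)))
      (PySem.Set.empty, PySem.Set.empty)
    = (PySem.Set.ofList ((stride2 seq).map (fun e => PySem.Int.mod e 2)),
       PySem.Set.ofList ((stride2 (seq.drop 1)).map (fun e => PySem.Int.mod e 2))) := by
  have henum := PySem.List.enumerate_eq_map_pyRange (xs := seq) (d := 0)
  have hfold :
      (PySem.List.pyRange 0 (seq.length : Int) 1).foldl
        (fun ab i => stepAB ab (i, PySem.List.pyGetD seq i 0))
        (PySem.Set.empty, PySem.Set.empty)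
      = (PySem.List.enumerate seq 0).foldl stepAB (PySem.Set.empty, PySem.Set.empty) := by
    rw [henum, List.foldl_map]
    rfl
  have : (fun (ab : PySem.Set Int × PySem.Set Int) (i : Int) =>
        if PySem.Int.mod i 2 = 0 then
          (PySem.Set.add ab.1 (PySem.Int.mod (PySem.List.pyGetD seq i 0) 2), ab.2)
        else
          (ab.1, PySem.Set.add ab.2 (PySem.Int.mod (PySem.List.pyGetD seq i 0) 2)))
      = (fun ab i => stepAB ab (i, PySem.List.pyGetD seq i 0)) := rfl
  rw [this, hfold, foldA_char seq 0, if_pos (show PySem.Int.mod 0 2 = 0 by decide)]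
  exact rfl

-- (x - z) % 2 == 0  ↔  same parity
lemma mod_sub_iff (x z : Int) :
    PySem.Int.mod (x - z) 2 = 0 ↔ PySem.Int.mod z 2 = PySem.Int.mod x 2 := by
  rw [PySem.Int.mod_eq_emod_of_pos (by norm_num), PySem.Int.mod_eq_emod_of_pos (by norm_num),
    PySem.Int.mod_eq_emod_of_pos (by norm_num)]
  omega

lemma allPar_cons (x z : Int) (L : List Int) :
    AllPar x (z :: L) ↔ PySem.Int.mod z 2 = PySem.Int.mod x 2 ∧ AllPar z L := by
  constructor
  · intro h
    refine ⟨h z (by simp), fun e he => ?_⟩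
    rw [h e (by simp [he]), h z (by simp)]
  · rintro ⟨hz, hL⟩ e he
    rcases List.mem_cons.mp he with rfl | he
    · exact hz
    · rw [hL e he, hz]

-- chk only ever returns "YES" or "NO"
lemma chk_val (l : List (Int × Int)) : chk l = "YES" ∨ chk l = "NO" := by
  induction l with
  | nil => left; rfl
  | cons p rest ih =>
    obtain ⟨x, y⟩ := p
    by_cases h : PySem.Int.mod (x - y) 2 ≠ 0
    · right; simp only [chk]; rw [if_pos h]
    · simp only [chk]; rw [if_neg h]; exact ih

-- B's loop characterised: on x :: y :: rest it says "YES" exactly when both index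
-- classes are parity-uniform.
lemma chk_char (rest : List Int) : ∀ (x y : Int),
    chk ((x :: y :: rest).zip rest) = "YES"
      ↔ AllPar x (stride2 rest) ∧ AllPar y (stride2 (rest.drop 1)) := by
  induction rest with
  | nil => intro x y; simp [chk, stride2_nil, AllPar]
  | cons z rest' ih =>
    intro x y
    have hz : (x :: y :: z :: rest').zip (z :: rest') =
        (x, z) :: ((y :: z :: rest').zip rest') := rfl
    rw [hz]
    by_cases h : PySem.Int.mod (x - z) 2 ≠ 0
    · constructor
      · intro hc
        have hno : chk ((x, z) :: ((y :: z :: rest').zip rest')) = "NO" := by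
          simp only [chk]; rw [if_pos h]
        rw [hno] at hc
        exact absurd hc (by decide)
      · rintro ⟨hA, _⟩
        exfalso
        rw [stride2_cons] at hA
        exact h ((mod_sub_iff x z).mpr (hA z (by simp)))
    · push_neg at h
      have hstep : chk ((x, z) :: ((y :: z :: rest').zip rest'))
          = chk ((y :: z :: rest').zip rest') := by
        simp only [chk]
        rw [if_neg (not_not_intro h)]
      rw [hstep, ih y z, stride2_cons, allPar_cons]
      constructor
      · rintro ⟨hy, hz'⟩
        exact ⟨⟨(mod_sub_iff x z).mp h, hz'⟩, hy⟩
      · rintro ⟨⟨_, hz'⟩, hy⟩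
        exact ⟨hy, hz'⟩

-- ===== VERDICT (by name: the statement is the Claim_ definition above) =====
theorem solution_spec : Claim_equal_solution := by
  intro seq _
  unfold Spec_solution solution solution_alt
  rw [solution_fold seq]
  match seq with
  | [] =>
    simp [stride2_nil, PySem.Set.ofList, PySem.Set.len]
  | [x] =>
    simp [stride2_nil, stride2_cons, PySem.Set.ofList, PySem.Set.len]
  | x :: y :: rest =>
    have hlen : ¬ (x :: y :: rest).length < 2 := by simp
    rw [if_neg hlen]
    have hdrop : (x :: y :: rest).drop 2 = rest := rfl
    rw [hdrop]
    have he : stride2 (x :: y :: rest) = x :: stride2 rest := by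
      rw [stride2_cons]; rfl
    have ho : stride2 ((x :: y :: rest).drop 1) = y :: stride2 (rest.drop 1) := by
      show stride2 (y :: rest) = _
      rw [stride2_cons]
    rw [he, ho]
    rcases chk_val ((x :: y :: rest).zip rest) with hc | hc
    · obtain ⟨h1, h2⟩ := (chk_char rest x y).mp hc
      rw [hc, if_pos ⟨(len_one_iff_allPar x _).mpr h1, (len_one_iff_allPar y _).mpr h2⟩]
    · rw [hc, if_neg (fun hP => by
        have := (chk_char rest x y).mpr
          ⟨(len_one_iff_allPar x _).mp hP.1, (len_one_iff_allPar y _).mp hP.2⟩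
        rw [this] at hc
        exact absurd hc (by decide))]
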